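-- pv_equiv track=rewrite | github.com/james0032/TiePin | compare_all_implementations.py | create_entity_mappings
-- ===== SOURCE A (Python) =====
-- from typing import Dict, List, Tuple, Set
--
-- def create_entity_mappings(train_triples: List, test_triples: List) -> Tuple[Dict, Dict, Dict]:
--     """Create entity and relation mappings."""
--     entity_to_idx = {}
--     idx_to_entity = {}
--     relation_to_idx = {}
--
--     current_entity_idx = 0
--     current_relation_idx = 0
--
--     for triple in list(train_triples) + list(test_triples):
--         h, r, t = triple[0], triple[1], triple[2]
--
--         if h not in entity_to_idx:
--             entity_to_idx[h] = current_entity_idx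
--             idx_to_entity[current_entity_idx] = h
--             current_entity_idx += 1
--
--         if t not in entity_to_idx:
--             entity_to_idx[t] = current_entity_idx
--             idx_to_entity[current_entity_idx] = t
--             current_entity_idx += 1
--
--         if r not in relation_to_idx:
--             relation_to_idx[r] = current_relation_idx
--             current_relation_idx += 1
--
--     return entity_to_idx, idx_to_entity, relation_to_idx
-- ===== SOURCE B (Python) =====
-- def _first_seen_order(stream):
--     # Scan the stream in reverse, overwriting: each key ends up mapped to its
--     # earliest position.  Sorting the keys by that position yields first-seen order.
--     earliest = {}
--     for pos, key in reversed(list(enumerate(stream))):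
--         earliest[key] = pos
--     return sorted(earliest, key=earliest.get)
--
--
-- def create_entity_mappings(train_triples, test_triples):
--     """Create entity and relation mappings."""
--     triples = list(train_triples) + list(test_triples)
--     ent_stream = []
--     for t in triples:
--         ent_stream.append(t[0])
--         ent_stream.append(t[2])
--     rel_stream = [t[1] for t in triples]
--     entities = _first_seen_order(ent_stream)
--     relations = _first_seen_order(rel_stream)
--     entity_to_idx = {e: i for i, e in enumerate(entities)}
--     idx_to_entity = dict(enumerate(entities))
--     relation_to_idx = {r: i for i, r in enumerate(relations)}
--     return entity_to_idx, idx_to_entity, relation_to_idx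
-- ===== Notes on version B (the rewrite author's own statement) =====
-- stated objective: alternative
-- what changed: A assigns indices in one pass with inline counters and membership tests; B flattens each key stream, scans it in reverse overwriting a position dict (so each key keeps its earliest position, no membership tests), sorts keys by that position and enumerates — a sort-by-first-occurrence algorithm instead of sequential first-seen dedup.
import Mathlib
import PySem

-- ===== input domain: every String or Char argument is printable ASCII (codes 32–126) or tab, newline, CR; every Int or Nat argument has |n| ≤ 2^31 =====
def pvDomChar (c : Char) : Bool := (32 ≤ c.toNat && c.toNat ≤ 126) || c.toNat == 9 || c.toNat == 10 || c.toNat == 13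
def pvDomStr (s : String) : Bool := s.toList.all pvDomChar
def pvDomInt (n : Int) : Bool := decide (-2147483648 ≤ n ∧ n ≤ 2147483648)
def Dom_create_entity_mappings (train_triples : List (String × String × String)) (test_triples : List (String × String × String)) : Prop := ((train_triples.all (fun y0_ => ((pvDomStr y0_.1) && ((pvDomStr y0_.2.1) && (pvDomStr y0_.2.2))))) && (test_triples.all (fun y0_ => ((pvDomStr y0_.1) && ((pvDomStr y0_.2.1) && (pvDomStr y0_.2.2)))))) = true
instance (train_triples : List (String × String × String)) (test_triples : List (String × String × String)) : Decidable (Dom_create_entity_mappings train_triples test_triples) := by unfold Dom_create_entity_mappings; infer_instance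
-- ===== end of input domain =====

-- B replaces A's one-pass counter/membership dict-building by a different algorithm: flatten
-- each key stream, scan it in REVERSE overwriting a position dict (each key keeps its earliest
-- position, no membership tests), then sort keys by that position and enumerate (alternative).

-- ===== PORT A =====
-- A's dicts are assoc lists; A only ever assigns to a key it just tested absent, and a fresh-key
-- Python dict assignment appends — so insert = append and 'k not in d' = no key matches (exact here).
def pvStA : Type := (List (String × Int)) × (List (Int × String)) × (List (String × Int)) × Int × Int

-- 'if h not in entity_to_idx: entity_to_idx[h] = i; idx_to_entity[i] = h; i += 1'
def pvEntIns (st : pvStA) (x : String) : pvStA :=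
  if st.1.any (fun p => p.1 == x) then st
  else (st.1 ++ [(x, st.2.2.2.1)], st.2.1 ++ [(st.2.2.2.1, x)], st.2.2.1, st.2.2.2.1 + 1, st.2.2.2.2)

-- 'if r not in relation_to_idx: relation_to_idx[r] = j; j += 1'
def pvRelIns (st : pvStA) (r : String) : pvStA :=
  if st.2.2.1.any (fun p => p.1 == r) then st
  else (st.1, st.2.1, st.2.2.1 ++ [(r, st.2.2.2.2)], st.2.2.2.1, st.2.2.2.2 + 1)

def create_entity_mappings (train_triples : List (String × String × String)) (test_triples : List (String × String × String)) : (List (String × Int)) × (List (Int × String)) × (List (String × Int)) :=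
  let fin := (train_triples ++ test_triples).foldl
    (fun st triple => pvRelIns (pvEntIns (pvEntIns st triple.1) triple.2.2) triple.2.1)
    ([], [], [], 0, 0)
  (fin.1, fin.2.1, fin.2.2.1)

-- ===== PORT B =====
-- '_first_seen_order(stream)': reverse loop over enumerate(stream) overwriting a dict, then
-- sorted(earliest, key=earliest.get) — all keys are present, so .get is getD (exact here).
def pvFirstSeenOrder (stream : List String) : List String :=
  let earliest := (PySem.List.enumerate stream 0).reverse.foldl
      (fun d p => PySem.Dict.insert d p.2 p.1) (PySem.Dict.empty : PySem.Dict String Int)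
  PySem.List.sorted (PySem.Dict.keys earliest) (fun k => PySem.Dict.getD earliest k 0) false

def create_entity_mappings_alt (train_triples : List (String × String × String)) (test_triples : List (String × String × String)) : (List (String × Int)) × (List (Int × String)) × (List (String × Int)) :=
  let triples := train_triples ++ test_triples
  let ent_stream := triples.foldl (fun acc t => acc ++ [t.1, t.2.2]) []
  let rel_stream := triples.map (fun t => t.2.1)
  let entities := pvFirstSeenOrder ent_stream
  let relations := pvFirstSeenOrder rel_stream
  ((PySem.List.enumerate entities 0).map (fun p => (p.2, p.1)),
   PySem.List.enumerate entities 0,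
   (PySem.List.enumerate relations 0).map (fun p => (p.2, p.1)))

-- ===== PRECONDITION & SPEC =====
def Spec_create_entity_mappings (train_triples : List (String × String × String)) (test_triples : List (String × String × String)) (out : (List (String × Int)) × (List (Int × String)) × (List (String × Int))) : Prop := out = create_entity_mappings_alt train_triples test_triples
instance (train_triples : List (String × String × String)) (test_triples : List (String × String × String)) (out : (List (String × Int)) × (List (Int × String)) × (List (String × Int))) : Decidable (Spec_create_entity_mappings train_triples test_triples out) := by unfold Spec_create_entity_mappings; infer_instance

-- ===== CLAIM (what is proved, stated in full; the proofs are below) =====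
def Claim_equal_create_entity_mappings : Prop := ∀ (train_triples : List (String × String × String)) (test_triples : List (String × String × String)), Dom_create_entity_mappings train_triples test_triples → Spec_create_entity_mappings train_triples test_triples (create_entity_mappings train_triples test_triples)

-- ===== LEMMAS AND PROOFS =====

-- first-occurrence position of a key, as B's dict stores it
def pvKey (stream : List String) (k : String) : Int :=
  match PySem.List.index? stream k with
  | some i => (i : Int)
  | none => 0

-- A's full state expressed from the first-seen discovery lists
def pvStateOf (es rs : List String) : pvStA :=
  ((PySem.List.enumerate es 0).map (fun p => (p.2, p.1)),
   PySem.List.enumerate es 0,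
   (PySem.List.enumerate rs 0).map (fun p => (p.2, p.1)),
   (es.length : Int), (rs.length : Int))

theorem pvAnyEnum (es : List String) (s : Int) (x : String) :
    ((PySem.List.enumerate es s).map (fun p => (p.2, p.1))).any (fun p => p.1 == x) = es.contains x := by
  induction es generalizing s with
  | nil => simp [PySem.List.enumerate_nil]
  | cons a as ih =>
    simp only [PySem.List.enumerate_cons, List.map_cons, List.any_cons, ih, List.contains_cons]
    simp [BEq.comm]

theorem pvEnumSnoc (es : List String) (x : String) :
    PySem.List.enumerate (es ++ [x]) 0 = PySem.List.enumerate es 0 ++ [((es.length : Int), x)] := by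
  rw [PySem.List.enumerate_append]
  simp [PySem.List.enumerate_cons, PySem.List.enumerate_nil]

theorem pvEntIns_stateOf (es rs : List String) (x : String) :
    pvEntIns (pvStateOf es rs) x = pvStateOf (PySem.Set.add es x) rs := by
  unfold pvEntIns pvStateOf
  rw [PySem.Set.add_eq_ite]
  simp only [pvAnyEnum]
  by_cases h : x ∈ es
  · simp [h]
  · simp [h, pvEnumSnoc]

theorem pvRelIns_stateOf (es rs : List String) (r : String) :
    pvRelIns (pvStateOf es rs) r = pvStateOf es (PySem.Set.add rs r) := by
  unfold pvRelIns pvStateOf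
  rw [PySem.Set.add_eq_ite]
  simp only [pvAnyEnum]
  by_cases h : r ∈ rs
  · simp [h]
  · simp [h, pvEnumSnoc]

theorem pvLoop (l : List (String × String × String)) (es rs : List String) :
    l.foldl (fun st triple => pvRelIns (pvEntIns (pvEntIns st triple.1) triple.2.2) triple.2.1)
      (pvStateOf es rs)
    = pvStateOf
        (l.foldl (fun es triple => PySem.Set.add (PySem.Set.add es triple.1) triple.2.2) es)
        (l.foldl (fun rs triple => PySem.Set.add rs triple.2.1) rs) := by
  induction l generalizing es rs with
  | nil => rfl
  | cons t l ih =>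
    simp only [List.foldl_cons, pvEntIns_stateOf, pvRelIns_stateOf]
    exact ih _ _

-- the last write wins in a fold of inserts keyed by the second component
theorem pvGetDFoldIns (L : List (Int × String)) (d : PySem.Dict String Int) (k : String) :
    PySem.Dict.getD (L.foldl (fun d p => PySem.Dict.insert d p.2 p.1) d) k 0
    = (match L.reverse.find? (fun p => p.2 == k) with
       | some p => p.1
       | none => PySem.Dict.getD d k 0) := by
  induction L generalizing d with
  | nil => simp
  | cons p L ih =>
    simp only [List.foldl_cons, List.reverse_cons, ih, List.find?_append]
    cases hf : L.reverse.find? (fun q => q.2 == k) with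
    | some q => simp
    | none =>
      simp only [Option.none_or]
      by_cases hk : p.2 = k
      · simp [hk]
      · have : (p.2 == k) = false := by simp [hk]
        simp [this, PySem.Dict.getD_insert, Ne.symm hk]

-- the first pair of enumerate(stream) whose element is k carries k's first index
theorem pvFindEnum (stream : List String) (s : Int) (k : String) :
    (PySem.List.enumerate stream s).find? (fun p => p.2 == k)
    = (PySem.List.index? stream k).map (fun i => (s + (i : Int), k)) := by
  induction stream generalizing s with
  | nil => simp [PySem.List.enumerate_nil]
  | cons a as ih =>
    by_cases hk : a = k
    · subst hk
      rw [PySem.List.index?_cons_self]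
      simp [PySem.List.enumerate_cons]
    · have hne : (a == k) = false := by simp [hk]
      rw [PySem.List.index?_cons_of_ne as hk]
      simp only [PySem.List.enumerate_cons, List.find?_cons, hne, ih]
      cases PySem.List.index? as k with
      | none => rfl
      | some i =>
        simp
        omega

-- B's dict maps each key of the stream to its first occurrence position
theorem pvGetDEarliest (stream : List String) (k : String) (hk : k ∈ stream) :
    PySem.Dict.getD
      ((PySem.List.enumerate stream 0).reverse.foldl
        (fun d p => PySem.Dict.insert d p.2 p.1) (PySem.Dict.empty : PySem.Dict String Int)) k 0
    = pvKey stream k := by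
  rw [pvGetDFoldIns, List.reverse_reverse, pvFindEnum]
  unfold pvKey
  cases hi : PySem.List.index? stream k with
  | none => rw [PySem.List.index?_eq_none_iff] at hi; exact absurd hk hi
  | some i => simp

-- first-seen dedup is strictly increasing under first-occurrence position
theorem pvOfListPairwise (stream : List String) :
    (PySem.Set.ofList stream).Pairwise (fun a b => pvKey stream a < pvKey stream b) := by
  induction stream using List.reverseRecOn with
  | nil => simp [PySem.Set.ofList]
  | append_singleton S x ih =>
    have hof : PySem.Set.ofList (S ++ [x]) = PySem.Set.add (PySem.Set.ofList S) x := by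
      simp [PySem.Set.ofList_eq_foldl]
    rw [hof, PySem.Set.add_eq_ite]
    have hkey : ∀ a ∈ S, pvKey (S ++ [x]) a = pvKey S a := by
      intro a ha
      unfold pvKey
      rw [PySem.List.index?_append_of_mem _ ha]
    by_cases hx : x ∈ S
    · rw [if_pos ((PySem.Set.mem_ofList _ _).2 hx)]
      refine ih.imp_of_mem ?_
      intro a b ha hb hab
      have ha' := (PySem.Set.mem_ofList _ _).1 ha
      have hb' := (PySem.Set.mem_ofList _ _).1 hb
      rw [hkey a ha', hkey b hb']
      exact hab
    · rw [if_neg (fun hmem => hx ((PySem.Set.mem_ofList _ _).1 hmem))]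
      rw [List.pairwise_append]
      refine ⟨?_, by simp, ?_⟩
      · refine ih.imp_of_mem ?_
        intro a b ha hb hab
        have ha' := (PySem.Set.mem_ofList _ _).1 ha
        have hb' := (PySem.Set.mem_ofList _ _).1 hb
        rw [hkey a ha', hkey b hb']
        exact hab
      · intro a ha b hb
        have ha' := (PySem.Set.mem_ofList _ _).1 ha
        have hb' : b = x := by simpa using hb
        subst hb'
        rw [hkey a ha']
        unfold pvKey
        rw [PySem.List.index?_append_singleton_self _ _ hx]
        cases hi : PySem.List.index? S a with
        | none => rw [PySem.List.index?_eq_none_iff] at hi; exact absurd ha' hi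
        | some i =>
          have := PySem.List.getElem_of_index?_eq_some hi
          obtain ⟨hlt, -⟩ := this
          simp only []
          exact_mod_cast hlt

-- B's helper computes the first-seen dedup of the stream
theorem pvFirstSeenOrder_eq (stream : List String) :
    pvFirstSeenOrder stream = PySem.Set.ofList stream := by
  unfold pvFirstSeenOrder
  set d := (PySem.List.enumerate stream 0).reverse.foldl
      (fun d p => PySem.Dict.insert d p.2 p.1) (PySem.Dict.empty : PySem.Dict String Int) with hd
  have hkeys : PySem.Dict.keys d = PySem.Set.ofList stream.reverse := by
    rw [hd, PySem.Dict.keys_foldl_insert_key]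
    have hm : List.map (fun p => p.2) (PySem.List.enumerate stream 0).reverse = stream.reverse := by
      rw [List.map_reverse, PySem.List.map_snd_enumerate]
    rw [hm, PySem.Set.ofList_eq_foldl]
    simp [PySem.Set.update, PySem.Dict.keys_empty]
  have hperm : (PySem.Set.ofList stream).Perm (PySem.Dict.keys d) := by
    rw [hkeys]
    refine (List.perm_ext_iff_of_nodup (PySem.Set.nodup_ofList _) (PySem.Set.nodup_ofList _)).2 ?_
    intro a
    simp [PySem.Set.mem_ofList]
  refine PySem.List.sorted_eq_of_perm_of_pairwise_lt _ _ _ hperm ?_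
  refine (pvOfListPairwise stream).imp_of_mem ?_
  intro a b ha hb hab
  have ha' := (PySem.Set.mem_ofList _ _).1 ha
  have hb' := (PySem.Set.mem_ofList _ _).1 hb
  rw [hd, pvGetDEarliest stream a ha', pvGetDEarliest stream b hb']
  exact hab

-- flattening then deduping the entity stream = A's per-triple two adds
theorem pvEntStream (l : List (String × String × String)) (es : List String) :
    (l.flatMap (fun t => [t.1, t.2.2])).foldl PySem.Set.add es
    = l.foldl (fun es t => PySem.Set.add (PySem.Set.add es t.1) t.2.2) es := by
  induction l generalizing es with
  | nil => rfl
  | cons t l ih => simp only [List.flatMap_cons, List.foldl_append, List.foldl_cons, List.foldl_nil, ih]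

-- ===== VERDICT (by name: the statement is the Claim_ definition above) =====
theorem create_entity_mappings_spec : Claim_equal_create_entity_mappings := by
  intro tr te _
  show _ = _
  unfold create_entity_mappings create_entity_mappings_alt
  have h0 : (([], [], [], 0, 0) : pvStA) = pvStateOf [] [] := by rfl
  rw [h0, pvLoop]
  have hent : pvFirstSeenOrder ((tr ++ te).foldl (fun acc t => acc ++ [t.1, t.2.2]) [])
      = (tr ++ te).foldl (fun es t => PySem.Set.add (PySem.Set.add es t.1) t.2.2) [] := by
    rw [pvFirstSeenOrder_eq, PySem.List.foldl_append_eq_flatMap, List.nil_append,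
      PySem.Set.ofList_eq_foldl, pvEntStream]
  have hrel : pvFirstSeenOrder ((tr ++ te).map (fun t => t.2.1))
      = (tr ++ te).foldl (fun rs t => PySem.Set.add rs t.2.1) [] := by
    rw [pvFirstSeenOrder_eq, PySem.Set.ofList_eq_foldl, List.foldl_map]
  simp only [hent, hrel]
  rfl
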